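-- pv_equiv track=rewrite | github.com/scholar-of-artifice/leetcode-programming-skills | length_of_last_word/length_of_last_word.py | final_word_right_bound
-- ===== SOURCE A (Python) =====
-- def final_word_right_bound(s: str) -> int:
--     # find the first right bound of a word
--     # start search from right
--     i = len(s) - 1
--     while i >= 0:
--         # ignore characters that are whitespace
--         if s[i] == ' ':
--             i = i - 1
--         else:
--             return i
--     return i
-- ===== SOURCE B (Python) =====
-- def final_word_right_bound(s: str) -> int:
--     # single forward pass: remember the index of the last non-space character seen
--     last = -1
--     for i, c in enumerate(s):
--         if c != ' ':
--             last = i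
--     return last
-- ===== Notes on version B (the rewrite author's own statement) =====
-- stated objective: alternative
-- what changed: A scans right-to-left and returns at the first non-space; B makes one forward pass over enumerate(s), recording the index of each non-space character, and returns the last one recorded (-1 if none).
import Mathlib
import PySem

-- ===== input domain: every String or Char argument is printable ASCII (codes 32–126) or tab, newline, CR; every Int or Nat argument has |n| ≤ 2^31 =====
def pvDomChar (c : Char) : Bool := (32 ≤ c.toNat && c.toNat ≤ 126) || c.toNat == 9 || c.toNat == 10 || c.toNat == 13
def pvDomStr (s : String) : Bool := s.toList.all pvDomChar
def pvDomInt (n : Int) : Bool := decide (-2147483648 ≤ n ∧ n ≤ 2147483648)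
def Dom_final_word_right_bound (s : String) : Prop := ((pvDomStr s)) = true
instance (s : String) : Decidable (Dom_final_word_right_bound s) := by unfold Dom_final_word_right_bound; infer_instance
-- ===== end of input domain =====

-- B replaces A's right-to-left early-return scan by a single forward fold over enumerate(s)
-- recording the last non-space index (alternative decomposition, same O(n) cost).


-- ===== PORT A =====
-- A's while-loop: i runs from len(s)-1 downward, skipping ' '; transcribed as structural
-- recursion on the reversed character list (the head of the reversed suffix is s[i],
-- and rest.length is that i), returning -1 when the loop runs out.
def finalWordGoA : List Char → Int
  | [] => -1
  | c :: rest => if c == ' ' then finalWordGoA rest else (rest.length : Int)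

def final_word_right_bound (s : String) : Int :=
  finalWordGoA s.toList.reverse

-- ===== PORT B =====
-- B's forward for-loop over enumerate(s) with accumulator `last`.
def final_word_right_bound_alt (s : String) : Int :=
  (PySem.List.enumerate s.toList 0).foldl
    (fun last p => if p.2 == ' ' then last else p.1) (-1)

-- ===== PRECONDITION & SPEC =====
def Spec_final_word_right_bound (s : String) (out : Int) : Prop := out = final_word_right_bound_alt s
instance (s : String) (out : Int) : Decidable (Spec_final_word_right_bound s out) := by unfold Spec_final_word_right_bound; infer_instance

-- ===== CLAIM (what is proved, stated in full; the proofs are below) =====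
def Claim_equal_final_word_right_bound : Prop := ∀ (s : String), Dom_final_word_right_bound s → Spec_final_word_right_bound s (final_word_right_bound s)

-- ===== LEMMAS AND PROOFS =====

-- forward fold over enumerate, with arbitrary start offset factored as `+ (k : Int)` via generalization
theorem finalWord_fold_eq (l : List Char) :
    (PySem.List.enumerate l 0).foldl (fun last p => if p.2 == ' ' then last else p.1) (-1)
      = finalWordGoA l.reverse := by
  induction l using List.reverseRecOn with
  | nil => simp [finalWordGoA]
  | append_singleton xs x ih =>
    rw [PySem.List.enumerate_append, List.foldl_append, List.reverse_append]
    simp only [PySem.List.enumerate_cons, PySem.List.enumerate_nil, List.foldl_cons,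
      List.foldl_nil, List.reverse_cons]
    by_cases hx : x = ' '
    · simpa [finalWordGoA, hx] using ih
    · simp [finalWordGoA, hx]

-- ===== VERDICT (by name: the statement is the Claim_ definition above) =====
theorem final_word_right_bound_spec : Claim_equal_final_word_right_bound := by
  intro s _
  unfold Spec_final_word_right_bound final_word_right_bound final_word_right_bound_alt
  exact (finalWord_fold_eq s.toList).symm
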